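-- pv_equiv track=rewrite | github.com/ACGSpgp/enhanced-agent-bus | governance_path/proof.py | _level_sizes
-- ===== SOURCE A (Python) =====
-- def _level_sizes(leaf_count: int) -> list[int]:
--     if leaf_count <= 0:
--         return []
--
--     sizes = [leaf_count]
--     current_size = leaf_count
--     while current_size > 1:
--         current_size = (current_size + 1) // 2
--         sizes.append(current_size)
--     return sizes
-- ===== SOURCE B (Python) =====
-- def _level_sizes(leaf_count: int) -> list[int]:
--     if leaf_count <= 0:
--         return []
--     levels = (leaf_count - 1).bit_length()
--     return [(leaf_count + (1 << k) - 1) >> k for k in range(levels + 1)]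
-- ===== Notes on version B (the rewrite author's own statement) =====
-- stated objective: alternative
-- what changed: Replaces the iterative repeated-ceiling-halving while-loop with a direct closed form: the number of levels is (leaf_count-1).bit_length() and level k is ceil(leaf_count/2^k) computed as a shift, so the list is built by one comprehension with no loop-carried state.
import Mathlib
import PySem

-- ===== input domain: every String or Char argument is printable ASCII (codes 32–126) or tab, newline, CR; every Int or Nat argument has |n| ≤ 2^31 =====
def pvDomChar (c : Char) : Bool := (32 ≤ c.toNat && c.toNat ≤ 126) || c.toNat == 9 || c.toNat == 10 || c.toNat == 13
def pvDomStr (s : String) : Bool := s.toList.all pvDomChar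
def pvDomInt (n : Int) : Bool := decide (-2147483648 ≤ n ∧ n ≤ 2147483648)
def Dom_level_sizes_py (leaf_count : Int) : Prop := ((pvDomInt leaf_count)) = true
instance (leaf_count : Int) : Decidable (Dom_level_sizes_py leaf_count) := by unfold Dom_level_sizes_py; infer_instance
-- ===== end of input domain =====

-- B replaces A's iterative ceiling-halving loop with a closed form: level k is
-- ceil(n/2^k) (a shift) for k up to (n-1).bit_length(); objective: alternative.


-- ===== PORT A =====
-- the while-loop: keeps halving (ceiling) current_size and collecting the values
def levelLoopA (current : Int) : List Int :=
  if current > 1 then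
    let c := PySem.Int.floordiv (current + 1) 2
    c :: levelLoopA c
  else []
termination_by current.toNat
decreasing_by
  rw [PySem.Int.floordiv_eq_ediv_of_pos (by omega)]
  omega

def level_sizes_py (leaf_count : Int) : List Int :=
  if leaf_count ≤ 0 then []
  else leaf_count :: levelLoopA leaf_count

-- ===== PORT B =====
def level_sizes_py_alt (leaf_count : Int) : List Int :=
  if leaf_count ≤ 0 then []
  else
    let levels := PySem.Int.bitLength (leaf_count - 1)
    (List.range (levels + 1)).map (fun k => (leaf_count + (1 <<< k) - 1) >>> k)

-- ===== PRECONDITION & SPEC =====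
def Spec_level_sizes_py (leaf_count : Int) (out : List Int) : Prop := out = level_sizes_py_alt leaf_count
instance (leaf_count : Int) (out : List Int) : Decidable (Spec_level_sizes_py leaf_count out) := by unfold Spec_level_sizes_py; infer_instance

-- ===== CLAIM (what is proved, stated in full; the proofs are below) =====
def Claim_equal_level_sizes_py : Prop := ∀ (leaf_count : Int), Dom_level_sizes_py leaf_count → Spec_level_sizes_py leaf_count (level_sizes_py leaf_count)

-- ===== LEMMAS AND PROOFS =====

-- B's per-level term, rewritten from shifts to Euclidean division
theorem shift_term (n : Int) (k : Nat) :
    (n + (1 <<< k) - 1) >>> k = (n + 2^k - 1) / 2^k := by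
  rw [Int.shiftRight_eq_div_pow]
  push_cast
  norm_num [Int.shiftLeft_eq]

-- ceiling division: (x + b - 1)/b = (x-1)/b + 1 for b > 0
theorem ceil_shift (x b : Int) (hb : 0 < b) : (x + b - 1) / b = (x - 1) / b + 1 := by
  rw [show x + b - 1 = (x - 1) + 1 * b by ring,
      Int.add_mul_ediv_right _ _ (ne_of_gt hb)]

-- nested ceiling halvings collapse: ceil(ceil((n+1)/2)/2^k) = ceil(n/2^(k+1))
theorem ceil_step (n : Int) (k : Nat) :
    ((n + 1) / 2 + 2^k - 1) / 2^k = (n + 2^(k+1) - 1) / 2^(k+1) := by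
  have h2k : (0:Int) < 2^k := by positivity
  rw [ceil_shift _ _ h2k, ceil_shift _ _ (by positivity),
      show (n + 1) / 2 - 1 = (n - 1) / 2 by omega,
      Int.ediv_ediv_of_nonneg (by norm_num : (0:Int) ≤ 2),
      show (2:Int) * 2^k = 2^(k+1) by ring]

-- main loop characterisation: for n ≥ 1 the loop output equals B's closed form
theorem loop_closed_form : ∀ (N : Nat) (n : Int), n.toNat ≤ N → 1 ≤ n →
    n :: levelLoopA n =
      (List.range (PySem.Int.bitLength (n - 1) + 1)).map
        (fun k => (n + (1 <<< k) - 1) >>> k) := by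
  intro N
  induction N with
  | zero => intro n h1 h2; omega
  | succ N ih =>
    intro n hN h1
    by_cases h2 : n ≤ 1
    · have : n = 1 := by omega
      subst this
      rw [levelLoopA]
      decide
    · push Not at h2
      set c := PySem.Int.floordiv (n + 1) 2 with hc
      have hce : c = (n + 1) / 2 := PySem.Int.floordiv_eq_ediv_of_pos (by omega)
      have hc1 : 1 ≤ c := by rw [hce]; omega
      have hcN : c.toNat ≤ N := by rw [hce]; omega
      have hbl : PySem.Int.bitLength (n - 1) = PySem.Int.bitLength (c - 1) + 1 := by
        have hcd : c - 1 = PySem.Int.floordiv (n - 1) 2 := by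
          rw [hce, PySem.Int.floordiv_eq_ediv_of_pos (by omega)]; omega
        rw [PySem.Int.bitLength_of_pos (by omega : (0:Int) < n - 1), ← hcd]
      have key : ∀ k ∈ List.range (PySem.Int.bitLength (c - 1) + 1),
          (c + (1 <<< k) - 1) >>> k = (n + (1 <<< (k + 1)) - 1) >>> (k + 1) := by
        intro k _
        rw [shift_term, shift_term, hce, ceil_step]
      calc n :: levelLoopA n
          = n :: (c :: levelLoopA c) := by
            rw [levelLoopA, if_pos (by omega : n > 1)]
        _ = n :: (List.range (PySem.Int.bitLength (c - 1) + 1)).map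
              (fun k => (c + (1 <<< k) - 1) >>> k) := by
            rw [ih c hcN hc1]
        _ = n :: (List.range (PySem.Int.bitLength (c - 1) + 1)).map
              (fun k => (n + (1 <<< (k + 1)) - 1) >>> (k + 1)) := by
            rw [List.map_congr_left key]
        _ = (List.range (PySem.Int.bitLength (c - 1) + 1 + 1)).map
              (fun k => (n + (1 <<< k) - 1) >>> k) := by
            conv_rhs => rw [List.range_succ_eq_map, List.map_cons, List.map_map]
            congr 1
            rw [shift_term]; norm_num
        _ = (List.range (PySem.Int.bitLength (n - 1) + 1)).map
              (fun k => (n + (1 <<< k) - 1) >>> k) := by rw [hbl]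

-- ===== VERDICT (by name: the statement is the Claim_ definition above) =====
theorem level_sizes_py_spec : Claim_equal_level_sizes_py := by
  intro n _
  unfold Spec_level_sizes_py level_sizes_py level_sizes_py_alt
  by_cases h : n ≤ 0
  · simp [h]
  · simp only [h]
    exact loop_closed_form n.toNat n le_rfl (by omega)
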